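-- pv_equiv track=rewrite | github.com/Moksil/BOJ | 9184_exciting function call.py | w
-- ===== SOURCE A (Python) =====
-- def w(a, b, c):
-- 	if a <= 0 or b <= 0 or c <= 0:
-- 		return 1
-- 	if a > 20 or b > 20 or c > 20:
-- 		return w(20, 20, 20)
-- 	ans = [[[0 for _ in range(21)] for _ in range(21)] for _ in range(21)]
-- 	for i in range(0, 21):
-- 		for j in range(0, 21):
-- 			for k in range(0, 21):
-- 				if i == 0 or j == 0 or k == 0:
-- 					ans[i][j][k] = 1
-- 					continue
-- 				if i < j and j < k:
-- 					ans[i][j][k] = ans[i][j][k - 1] + ans[i][j - 1][k - 1] - ans[i][j - 1][k]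
-- 					continue
-- 				else:
-- 					ans[i][j][k] = ans[i - 1][j][k] + ans[i - 1][j - 1][k] + ans[i - 1][j][k - 1] - ans[i - 1][j - 1][k - 1]
-- 	return ans[a][b][c]
-- ===== SOURCE B (Python) =====
-- # Top-down memoized recursion instead of pre-filling the whole 21^3 table: only reachable subproblems are computed.
-- _memo = {}
--
-- def w(a, b, c):
--     if a <= 0 or b <= 0 or c <= 0:
--         return 1
--     if a > 20 or b > 20 or c > 20:
--         a, b, c = 20, 20, 20
--     return _w_rec(a, b, c)
--
-- def _w_rec(a, b, c):
--     if a <= 0 or b <= 0 or c <= 0: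
--         return 1
--     key = (a, b, c)
--     if key in _memo:
--         return _memo[key]
--     if a < b < c:
--         r = _w_rec(a, b, c - 1) + _w_rec(a, b - 1, c - 1) - _w_rec(a, b - 1, c)
--     else:
--         r = _w_rec(a - 1, b, c) + _w_rec(a - 1, b - 1, c) + _w_rec(a - 1, b, c - 1) - _w_rec(a - 1, b - 1, c - 1)
--     _memo[key] = r
--     return r
-- ===== Notes on version B (the rewrite author's own statement) =====
-- stated objective: alternative
-- what changed: Replaced the per-call bottom-up fill of the whole 21x21x21 table with top-down memoized recursion on a module-level dict, so only reachable subproblems are computed and repeated calls reuse the cache.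
import Mathlib
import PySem

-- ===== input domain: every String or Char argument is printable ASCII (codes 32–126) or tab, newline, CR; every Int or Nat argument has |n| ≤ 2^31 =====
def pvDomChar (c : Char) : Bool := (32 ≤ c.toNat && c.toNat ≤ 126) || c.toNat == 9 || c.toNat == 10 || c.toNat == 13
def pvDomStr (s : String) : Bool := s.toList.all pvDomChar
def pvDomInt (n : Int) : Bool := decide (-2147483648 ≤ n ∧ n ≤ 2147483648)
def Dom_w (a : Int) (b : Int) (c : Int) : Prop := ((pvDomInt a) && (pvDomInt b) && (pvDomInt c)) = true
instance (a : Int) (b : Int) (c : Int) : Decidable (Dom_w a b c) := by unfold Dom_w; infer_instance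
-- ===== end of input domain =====

-- B replaces A's per-call 21x21x21 bottom-up table fill with top-down memoized recursion on a dict.

-- ===== PORT A =====
-- ans[i][j][k] read/write; every index A uses is in 0..20, so the getD/setD defaults are never hit
def wGet3 (t : List (List (List Int))) (i j k : Int) : Int :=
  PySem.List.pyGetD (PySem.List.pyGetD (PySem.List.pyGetD t i []) j []) k 0

def wSet3 (t : List (List (List Int))) (i j k : Int) (v : Int) : List (List (List Int)) :=
  PySem.List.pySetD t i
    (PySem.List.pySetD (PySem.List.pyGetD t i []) j
      (PySem.List.pySetD (PySem.List.pyGetD (PySem.List.pyGetD t i []) j []) k v))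

-- the [[[0 …]]] initial table of A
def wZero : List (List (List Int)) :=
  (PySem.List.pyRange 0 21 1).map (fun _ =>
    (PySem.List.pyRange 0 21 1).map (fun _ =>
      (PySem.List.pyRange 0 21 1).map (fun _ => (0 : Int))))

-- the body of A's innermost loop (one cell assignment)
def wCellK (i j : Int) (t : List (List (List Int))) (k : Int) : List (List (List Int)) :=
  if i = 0 ∨ j = 0 ∨ k = 0 then wSet3 t i j k 1
  else if i < j ∧ j < k then
    wSet3 t i j k (wGet3 t i j (k-1) + wGet3 t i (j-1) (k-1) - wGet3 t i (j-1) k)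
  else
    wSet3 t i j k (wGet3 t (i-1) j k + wGet3 t (i-1) (j-1) k + wGet3 t (i-1) j (k-1)
                    - wGet3 t (i-1) (j-1) (k-1))

-- the loop over k, then the loop over j
def wInnerJ (i : Int) (t : List (List (List Int))) (j : Int) : List (List (List Int)) :=
  (PySem.List.pyRange 0 21 1).foldl (wCellK i j) t

def wStep (t : List (List (List Int))) (i : Int) : List (List (List Int)) :=
  (PySem.List.pyRange 0 21 1).foldl (wInnerJ i) t

-- the filled table (A rebuilds it on every call; it depends on no input, so it is a constant helper)
def wTable : List (List (List Int)) := (PySem.List.pyRange 0 21 1).foldl wStep wZero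

def w (a : Int) (b : Int) (c : Int) : Int :=
  if a ≤ 0 ∨ b ≤ 0 ∨ c ≤ 0 then 1
  else if a > 20 ∨ b > 20 ∨ c > 20 then w 20 20 20
  else wGet3 wTable a b c
termination_by (if a > 20 ∨ b > 20 ∨ c > 20 then 1 else 0 : Nat)
decreasing_by simp_all

-- termination helper for the B port (cited by wRec's decreasing_by)
theorem wRecDec {x y z : Int} (h : ¬(x ≤ 0 ∨ y ≤ 0 ∨ z ≤ 0)) {s : Int}
    (hs : s + 1 ≤ x + y + z) : s.toNat < (x + y + z).toNat := by omega

-- ===== PORT B =====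
-- _w_rec of Source B, with the module-level memo dict threaded through explicitly
def wRec (a b c : Int) (m : PySem.Dict (Int × Int × Int) Int) :
    Int × PySem.Dict (Int × Int × Int) Int :=
  if a ≤ 0 ∨ b ≤ 0 ∨ c ≤ 0 then (1, m)
  else
    match m.get? (a, b, c) with
    | some v => (v, m)
    | none =>
      if a < b ∧ b < c then
        let r1 := wRec a b (c-1) m
        let r2 := wRec a (b-1) (c-1) r1.2
        let r3 := wRec a (b-1) c r2.2
        let r := r1.1 + r2.1 - r3.1
        (r, r3.2.insert (a, b, c) r)
      else
        let r1 := wRec (a-1) b c m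
        let r2 := wRec (a-1) (b-1) c r1.2
        let r3 := wRec (a-1) b (c-1) r2.2
        let r4 := wRec (a-1) (b-1) (c-1) r3.2
        let r := r1.1 + r2.1 + r3.1 - r4.1
        (r, r4.2.insert (a, b, c) r)
termination_by (a + b + c).toNat
decreasing_by all_goals exact wRecDec (by assumption) (by omega)

def w_alt (a : Int) (b : Int) (c : Int) : Int :=
  if a ≤ 0 ∨ b ≤ 0 ∨ c ≤ 0 then 1
  else if a > 20 ∨ b > 20 ∨ c > 20 then (wRec 20 20 20 PySem.Dict.empty).1
  else (wRec a b c PySem.Dict.empty).1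

-- ===== PRECONDITION & SPEC =====
def Spec_w (a : Int) (b : Int) (c : Int) (out : Int) : Prop := out = w_alt a b c
instance (a : Int) (b : Int) (c : Int) (out : Int) : Decidable (Spec_w a b c out) := by unfold Spec_w; infer_instance

-- ===== CLAIM (what is proved, stated in full; the proofs are below) =====
def Claim_equal_w : Prop := ∀ (a : Int) (b : Int) (c : Int), Dom_w a b c → Spec_w a b c (w a b c)

-- ===== LEMMAS AND PROOFS =====

-- the mathematical recurrence both programs compute
def wF (a b c : Int) : Int :=
  if a ≤ 0 ∨ b ≤ 0 ∨ c ≤ 0 then 1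
  else if a < b ∧ b < c then wF a b (c-1) + wF a (b-1) (c-1) - wF a (b-1) c
  else wF (a-1) b c + wF (a-1) (b-1) c + wF (a-1) b (c-1) - wF (a-1) (b-1) (c-1)
termination_by (a + b + c).toNat
decreasing_by all_goals omega

-- shape of the table: 21 planes of 21 rows of 21 entries
def wShape (t : List (List (List Int))) : Prop :=
  t.length = 21 ∧ ∀ p ∈ t, p.length = 21 ∧ ∀ r ∈ p, r.length = 21

-- cells before linear position N (in the fill order) carry the recurrence values
def wDone (N : Int) (t : List (List (List Int))) : Prop :=
  ∀ p q r : Int, 0 ≤ p → p < 21 → 0 ≤ q → q < 21 → 0 ≤ r → r < 21 →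
    441*p + 21*q + r < N → wGet3 t p q r = wF p q r

theorem wShape_wZero : wShape wZero := by
  constructor
  · simp [wZero, PySem.List.length_pyRange_one]
  · intro p hp
    simp only [wZero, List.mem_map] at hp
    obtain ⟨x, hx, rfl⟩ := hp
    refine ⟨by simp [PySem.List.length_pyRange_one], ?_⟩
    intro r hr
    simp only [List.mem_map] at hr
    obtain ⟨y, hy, rfl⟩ := hr
    simp [PySem.List.length_pyRange_one]

theorem wPyGetD_mem3 {α : Type} (xs : List α) (i : Int) (d : α) (h0 : 0 ≤ i)
    (h1 : i < (xs.length : Int)) : PySem.List.pyGetD xs i d ∈ xs := by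
  rw [PySem.List.pyGetD_eq_getElem xs d h0 h1]
  exact List.getElem_mem _

theorem wShape_row (t : List (List (List Int))) (h : wShape t) (i : Int)
    (hi : 0 ≤ i) (hi' : i < 21) :
    (PySem.List.pyGetD t i []).length = 21 ∧
      ∀ r ∈ PySem.List.pyGetD t i [], r.length = 21 :=
  h.2 _ (wPyGetD_mem3 t i [] hi (by rw [h.1]; exact_mod_cast hi'))

theorem wShape_rr (t : List (List (List Int))) (h : wShape t) (i j : Int)
    (hi : 0 ≤ i) (hi' : i < 21) (hj : 0 ≤ j) (hj' : j < 21) :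
    (PySem.List.pyGetD (PySem.List.pyGetD t i []) j []).length = 21 :=
  (wShape_row t h i hi hi').2 _ (wPyGetD_mem3 _ j [] hj
    (by rw [(wShape_row t h i hi hi').1]; exact_mod_cast hj'))

theorem wGet3_wSet3 (t : List (List (List Int))) (h : wShape t) (i j k p q r : Int)
    (hi : 0 ≤ i) (hi' : i < 21) (hj : 0 ≤ j) (hj' : j < 21) (hk : 0 ≤ k) (hk' : k < 21)
    (hp : 0 ≤ p) (hp' : p < 21) (hq : 0 ≤ q) (hq' : q < 21) (hr : 0 ≤ r) (hr' : r < 21)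
    (v : Int) :
    wGet3 (wSet3 t i j k v) p q r =
      if p = i ∧ q = j ∧ r = k then v else wGet3 t p q r := by
  obtain ⟨ni, rfl⟩ : ∃ n : Nat, i = (n : Int) := ⟨i.toNat, (Int.toNat_of_nonneg hi).symm⟩
  obtain ⟨nj, rfl⟩ : ∃ n : Nat, j = (n : Int) := ⟨j.toNat, (Int.toNat_of_nonneg hj).symm⟩
  obtain ⟨nk, rfl⟩ : ∃ n : Nat, k = (n : Int) := ⟨k.toNat, (Int.toNat_of_nonneg hk).symm⟩
  obtain ⟨np, rfl⟩ : ∃ n : Nat, p = (n : Int) := ⟨p.toNat, (Int.toNat_of_nonneg hp).symm⟩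
  obtain ⟨nq, rfl⟩ : ∃ n : Nat, q = (n : Int) := ⟨q.toNat, (Int.toNat_of_nonneg hq).symm⟩
  obtain ⟨nr, rfl⟩ : ∃ n : Nat, r = (n : Int) := ⟨r.toNat, (Int.toNat_of_nonneg hr).symm⟩
  have hT : t.length = 21 := h.1
  have hrow : (PySem.List.pyGetD t (ni : Int) []).length = 21 :=
    (wShape_row t h ni (by omega) (by omega)).1
  have hrr : (PySem.List.pyGetD (PySem.List.pyGetD t (ni : Int) []) (nj : Int) []).length = 21 :=
    wShape_rr t h ni nj (by omega) (by omega) (by omega) (by omega)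
  unfold wGet3 wSet3
  rw [PySem.List.pyGetD_pySetD_natCast t ni np _ [] (by omega)]
  by_cases hpi : np = ni
  · subst hpi
    rw [if_pos rfl]
    rw [PySem.List.pyGetD_pySetD_natCast _ nj nq _ [] (by omega)]
    by_cases hqj : nq = nj
    · subst hqj
      rw [if_pos rfl]
      rw [PySem.List.pyGetD_pySetD_natCast _ nk nr v 0 (by omega)]
      by_cases hrk : nr = nk
      · subst hrk
        rw [if_pos rfl, if_pos ⟨rfl, rfl, rfl⟩]
      · rw [if_neg hrk, if_neg (by simp; omega)]
    · rw [if_neg hqj, if_neg (by simp; omega)]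
  · rw [if_neg hpi, if_neg (by simp; omega)]

theorem wShape_wSet3 (t : List (List (List Int))) (h : wShape t) (i j k : Int)
    (hi : 0 ≤ i) (hi' : i < 21) (hj : 0 ≤ j) (hj' : j < 21) (hk : 0 ≤ k)
    (v : Int) : wShape (wSet3 t i j k v) := by
  have hrow := wShape_row t h i hi hi'
  have hrr := wShape_rr t h i j hi hi' hj hj'
  unfold wSet3
  rw [PySem.List.pySetD_of_nonneg _ _ hi, PySem.List.pySetD_of_nonneg _ _ hj,
      PySem.List.pySetD_of_nonneg _ _ hk]
  refine ⟨by simp [h.1], ?_⟩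
  intro p hp
  rcases List.mem_or_eq_of_mem_set hp with hp | rfl
  · exact h.2 p hp
  · refine ⟨by simp [hrow.1], ?_⟩
    intro r hr
    rcases List.mem_or_eq_of_mem_set hr with hr | rfl
    · exact hrow.2 r hr
    · simp [hrr]

theorem wCellK_correct (i j kk : Int)
    (hi : 0 ≤ i) (hi' : i < 21) (hj : 0 ≤ j) (hj' : j < 21) (hk : 0 ≤ kk) (hk' : kk < 21)
    (t : List (List (List Int))) (ht : wShape t) (hd : wDone (441*i + 21*j + kk) t) :
    wShape (wCellK i j t kk) ∧ wDone (441*i + 21*j + kk + 1) (wCellK i j t kk) := by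
  have hval : ∃ v, wCellK i j t kk = wSet3 t i j kk v ∧ v = wF i j kk := by
    unfold wCellK
    by_cases h0 : i = 0 ∨ j = 0 ∨ kk = 0
    · refine ⟨1, by rw [if_pos h0], ?_⟩
      rw [wF, if_pos (by omega)]
    · rw [if_neg h0]
      by_cases hlt : i < j ∧ j < kk
      · refine ⟨_, by rw [if_pos hlt], ?_⟩
        rw [hd i j (kk-1) (by omega) (by omega) (by omega) (by omega) (by omega) (by omega) (by omega),
            hd i (j-1) (kk-1) (by omega) (by omega) (by omega) (by omega) (by omega) (by omega) (by omega),
            hd i (j-1) kk (by omega) (by omega) (by omega) (by omega) (by omega) (by omega) (by omega)]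
        conv_rhs => rw [wF]
        rw [if_neg (by omega), if_pos hlt]
      · refine ⟨_, by rw [if_neg hlt], ?_⟩
        rw [hd (i-1) j kk (by omega) (by omega) (by omega) (by omega) (by omega) (by omega) (by omega),
            hd (i-1) (j-1) kk (by omega) (by omega) (by omega) (by omega) (by omega) (by omega) (by omega),
            hd (i-1) j (kk-1) (by omega) (by omega) (by omega) (by omega) (by omega) (by omega) (by omega),
            hd (i-1) (j-1) (kk-1) (by omega) (by omega) (by omega) (by omega) (by omega) (by omega) (by omega)]
        conv_rhs => rw [wF]
        rw [if_neg (by omega), if_neg hlt]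
  obtain ⟨v, hveq, hv⟩ := hval
  rw [hveq]
  refine ⟨wShape_wSet3 t ht i j kk hi hi' hj hj' hk v, ?_⟩
  intro p q r hp hp' hq hq' hr hr' hlin
  rw [wGet3_wSet3 t ht i j kk p q r hi hi' hj hj' hk hk' hp hp' hq hq' hr hr' v]
  by_cases he : p = i ∧ q = j ∧ r = kk
  · rw [if_pos he, hv, he.1, he.2.1, he.2.2]
  · rw [if_neg he]
    refine hd p q r hp hp' hq hq' hr hr' ?_
    rcases not_and_or.mp he with h | h
    · omega
    · rcases not_and_or.mp h with h' | h' <;> omega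

theorem wFoldK (i j : Int) (hi : 0 ≤ i) (hi' : i < 21) (hj : 0 ≤ j) (hj' : j < 21) :
    ∀ (len : Nat) (kk : Int), kk = 21 - (len : Int) → 0 ≤ kk →
    ∀ t, wShape t → wDone (441*i + 21*j + kk) t →
    wShape ((PySem.List.pyRange kk 21 1).foldl (wCellK i j) t) ∧
      wDone (441*i + 21*j + 21) ((PySem.List.pyRange kk 21 1).foldl (wCellK i j) t) := by
  intro len
  induction len with
  | zero =>
    intro kk hkk hkk' t ht hd
    rw [PySem.List.pyRange_one_eq_nil (by omega)]
    have : kk = 21 := by omega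
    subst this
    exact ⟨ht, hd⟩
  | succ n ih =>
    intro kk hkk hkk' t ht hd
    rw [PySem.List.pyRange_one_cons (by omega), List.foldl_cons]
    obtain ⟨ht1, hd1⟩ := wCellK_correct i j kk hi hi' hj hj' hkk' (by omega) t ht hd
    have := ih (kk + 1) (by omega) (by omega) (wCellK i j t kk) ht1
      (by have : 441*i + 21*j + kk + 1 = 441*i + 21*j + (kk+1) := by ring
          rwa [this] at hd1)
    exact this

theorem wFoldJ (i : Int) (hi : 0 ≤ i) (hi' : i < 21) :
    ∀ (len : Nat) (jj : Int), jj = 21 - (len : Int) → 0 ≤ jj →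
    ∀ t, wShape t → wDone (441*i + 21*jj) t →
    wShape ((PySem.List.pyRange jj 21 1).foldl (wInnerJ i) t) ∧
      wDone (441*i + 441) ((PySem.List.pyRange jj 21 1).foldl (wInnerJ i) t) := by
  intro len
  induction len with
  | zero =>
    intro jj hjj hjj' t ht hd
    rw [PySem.List.pyRange_one_eq_nil (by omega)]
    have : jj = 21 := by omega
    subst this
    refine ⟨ht, ?_⟩
    have : 441*i + 441 = 441*i + 21*(21:Int) := by ring
    rwa [this]
  | succ n ih =>
    intro jj hjj hjj' t ht hd
    rw [PySem.List.pyRange_one_cons (by omega), List.foldl_cons]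
    have h0 : wDone (441*i + 21*jj + 0) t := by simpa using hd
    obtain ⟨ht1, hd1⟩ := wFoldK i jj hi hi' (by omega) (by omega) 21 0 (by norm_num) (by omega)
      t ht h0
    refine ih (jj + 1) (by omega) (by omega) _ ht1 ?_
    · have : 441*i + 21*(jj+1) = 441*i + 21*jj + 21 := by ring
      rw [this]
      exact hd1

theorem wFoldI :
    ∀ (len : Nat) (ii : Int), ii = 21 - (len : Int) → 0 ≤ ii →
    ∀ t, wShape t → wDone (441*ii) t →
    wDone 9261 ((PySem.List.pyRange ii 21 1).foldl wStep t) := by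
  intro len
  induction len with
  | zero =>
    intro ii hii hii' t ht hd
    rw [PySem.List.pyRange_one_eq_nil (by omega)]
    have : ii = 21 := by omega
    subst this
    simpa using hd
  | succ n ih =>
    intro ii hii hii' t ht hd
    rw [PySem.List.pyRange_one_cons (by omega), List.foldl_cons]
    have h0 : wDone (441*ii + 21*(0:Int)) t := by simpa using hd
    obtain ⟨ht1, hd1⟩ := wFoldJ ii (by omega) (by omega) 21 0 (by norm_num) (by omega) t ht h0
    refine ih (ii + 1) (by omega) (by omega) _ ht1 ?_
    have : 441*(ii+1) = 441*ii + 441 := by ring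
    rw [this]
    exact hd1

theorem wTable_correct (p q r : Int) (hp : 0 ≤ p) (hp' : p ≤ 20) (hq : 0 ≤ q) (hq' : q ≤ 20)
    (hr : 0 ≤ r) (hr' : r ≤ 20) : wGet3 wTable p q r = wF p q r := by
  have h := wFoldI 21 0 (by norm_num) (by omega) wZero wShape_wZero
    (by intro p q r _ _ _ _ _ _ h; omega)
  exact h p q r hp (by omega) hq (by omega) hr (by omega) (by omega)

def wInv (m : PySem.Dict (Int × Int × Int) Int) : Prop :=
  ∀ p v, m.get? p = some v → v = wF p.1 p.2.1 p.2.2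

theorem wRec_correct : ∀ (n : Nat) (a b c : Int) (m : PySem.Dict (Int × Int × Int) Int),
    (a + b + c).toNat ≤ n →
    wInv m → (wRec a b c m).1 = wF a b c ∧ wInv (wRec a b c m).2 := by
  intro n
  induction n with
  | zero =>
    intro a b c m hn hm
    have hg : a ≤ 0 ∨ b ≤ 0 ∨ c ≤ 0 := by omega
    rw [wRec, if_pos hg, wF, if_pos hg]
    exact ⟨rfl, hm⟩
  | succ n ih =>
    intro a b c m hn hm
    rw [wRec]
    by_cases hg : a ≤ 0 ∨ b ≤ 0 ∨ c ≤ 0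
    · rw [if_pos hg, wF, if_pos hg]
      exact ⟨rfl, hm⟩
    · rw [if_neg hg]
      cases hget : m.get? (a, b, c) with
      | some v =>
        simp only []
        exact ⟨hm (a,b,c) v hget, hm⟩
      | none =>
        simp only []
        by_cases hlt : a < b ∧ b < c
        · rw [if_pos hlt]
          have hrec : wF a b c = wF a b (c-1) + wF a (b-1) (c-1) - wF a (b-1) c := by
            rw [wF, if_neg hg, if_pos hlt]
          obtain ⟨e1, m1⟩ := ih a b (c-1) m (by omega) hm
          obtain ⟨e2, m2⟩ := ih a (b-1) (c-1) _ (by omega) m1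
          obtain ⟨e3, m3⟩ := ih a (b-1) c _ (by omega) m2
          constructor
          · simp only [e1, e2, e3, hrec]
          · intro p v hp
            rw [PySem.Dict.get?_insert] at hp
            split at hp
            · rename_i hpk
              subst hpk
              simp only [Option.some.injEq] at hp
              rw [← hp, e1, e2, e3, hrec]
            · exact m3 p v hp
        · rw [if_neg hlt]
          have hrec : wF a b c
              = wF (a-1) b c + wF (a-1) (b-1) c + wF (a-1) b (c-1) - wF (a-1) (b-1) (c-1) := by
            rw [wF, if_neg hg, if_neg hlt]
          obtain ⟨e1, m1⟩ := ih (a-1) b c m (by omega) hm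
          obtain ⟨e2, m2⟩ := ih (a-1) (b-1) c _ (by omega) m1
          obtain ⟨e3, m3⟩ := ih (a-1) b (c-1) _ (by omega) m2
          obtain ⟨e4, m4⟩ := ih (a-1) (b-1) (c-1) _ (by omega) m3
          constructor
          · simp only [e1, e2, e3, e4, hrec]
          · intro p v hp
            rw [PySem.Dict.get?_insert] at hp
            split at hp
            · rename_i hpk
              subst hpk
              simp only [Option.some.injEq] at hp
              rw [← hp, e1, e2, e3, e4, hrec]
            · exact m4 p v hp

theorem wInv_empty : wInv (PySem.Dict.empty : PySem.Dict (Int × Int × Int) Int) := by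
  intro p v hp
  simp [PySem.Dict.get?_empty] at hp

theorem wRec_eval (a b c : Int) : (wRec a b c PySem.Dict.empty).1 = wF a b c :=
  (wRec_correct (a+b+c).toNat a b c PySem.Dict.empty (le_refl _) wInv_empty).1

-- ===== VERDICT (by name: the statement is the Claim_ definition above) =====
theorem w_spec : Claim_equal_w := by
  intro a b c _
  unfold Spec_w w_alt
  by_cases hg : a ≤ 0 ∨ b ≤ 0 ∨ c ≤ 0
  · rw [w, if_pos hg, if_pos hg]
  · rw [w, if_neg hg, if_neg hg]
    by_cases hcl : a > 20 ∨ b > 20 ∨ c > 20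
    · rw [if_pos hcl, if_pos hcl]
      rw [w]
      norm_num
      rw [wRec_eval 20 20 20]
      exact wTable_correct 20 20 20 (by omega) (by omega) (by omega) (by omega) (by omega) (by omega)
    · rw [if_neg hcl, if_neg hcl]
      rw [wRec_eval a b c]
      exact wTable_correct a b c (by omega) (by omega) (by omega) (by omega) (by omega) (by omega)
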